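-- pv_equiv track=rewrite | github.com/NikitaKums/TalTech | iti0102/EX09A/princesses.py | sort_by_status
-- ===== SOURCE A (Python) =====
-- def sort_by_status(filtered_lines) -> list:
--     """
--     Sort lines by pattern FIGHTS FOR LIFE > INJURED > IN PANIC > BORED.
--
--     FIGHTS FOR LIFE comes before INJURED etc.
--
--     :param filtered_lines:
--     :return: sorted lines.
--     """
--     fightforlife = []
--     injured = []
--     inpanic = []
--     bored = []
--     patterns = ["FIGHTS FOR LIFE", "INJURED", "IN PANIC", "BORED"]
--     for word in filtered_lines:
--         if patterns[0] in word:
--             fightforlife.append(word)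
--             continue
--         if patterns[1] in word:
--             injured.append(word)
--             continue
--         if patterns[2] in word:
--             inpanic.append(word)
--             continue
--         if patterns[3] in word:
--             bored.append(word)
--             continue
--     result = fightforlife + injured + inpanic + bored
--     return result
-- ===== SOURCE B (Python) =====
-- def sort_by_status(filtered_lines) -> list:
--     patterns = ["FIGHTS FOR LIFE", "INJURED", "IN PANIC", "BORED"]
--     matching = [w for w in filtered_lines if any(p in w for p in patterns)]
--     return sorted(matching, key=lambda w: next(i for i, p in enumerate(patterns) if p in w))
-- ===== Notes on version B (the rewrite author's own statement) =====
-- stated objective: idiomatic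
-- what changed: Replaces the four explicit priority buckets concatenated at the end with a filter of the matching lines followed by a stable sort keyed by the index of the first matching pattern.
import Mathlib
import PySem

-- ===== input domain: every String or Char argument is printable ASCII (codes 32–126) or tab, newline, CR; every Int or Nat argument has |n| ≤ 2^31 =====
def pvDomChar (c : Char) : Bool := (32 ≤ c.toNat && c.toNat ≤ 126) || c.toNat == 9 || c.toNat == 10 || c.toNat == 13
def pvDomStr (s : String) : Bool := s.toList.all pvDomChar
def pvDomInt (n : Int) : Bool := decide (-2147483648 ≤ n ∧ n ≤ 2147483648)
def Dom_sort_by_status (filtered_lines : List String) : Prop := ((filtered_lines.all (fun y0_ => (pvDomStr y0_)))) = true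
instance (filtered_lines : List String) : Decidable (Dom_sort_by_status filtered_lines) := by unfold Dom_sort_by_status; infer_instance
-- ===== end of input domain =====

-- B replaces A's four hand-maintained priority buckets by a filter plus a stable sort on the
-- index of the first matching pattern (objective: idiomatic; same return value, no speed claim).

-- ===== PORT A =====
def sort_by_status (filtered_lines : List String) : List String :=
  let patterns : List String := ["FIGHTS FOR LIFE", "INJURED", "IN PANIC", "BORED"]
  let st := filtered_lines.foldl
    (fun (st : List String × List String × List String × List String) word =>
      if PySem.Str.isIn (PySem.List.pyGetD patterns 0 "") word then
        (st.1 ++ [word], st.2.1, st.2.2.1, st.2.2.2)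
      else if PySem.Str.isIn (PySem.List.pyGetD patterns 1 "") word then
        (st.1, st.2.1 ++ [word], st.2.2.1, st.2.2.2)
      else if PySem.Str.isIn (PySem.List.pyGetD patterns 2 "") word then
        (st.1, st.2.1, st.2.2.1 ++ [word], st.2.2.2)
      else if PySem.Str.isIn (PySem.List.pyGetD patterns 3 "") word then
        (st.1, st.2.1, st.2.2.1, st.2.2.2 ++ [word])
      else st)
    (([], [], [], []))
  st.1 ++ st.2.1 ++ st.2.2.1 ++ st.2.2.2

-- ===== PORT B =====
def pvPatterns : List String := ["FIGHTS FOR LIFE", "INJURED", "IN PANIC", "BORED"]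

-- next(i for i, p in enumerate(patterns) if p in w); B only applies it to matching lines,
-- so the getD default (where Python's next would raise) is unreachable there.
def pvKey (w : String) : Int :=
  (((PySem.List.enumerate pvPatterns 0).find? (fun ip => PySem.Str.isIn ip.2 w)).map Prod.fst).getD 0

def sort_by_status_alt (filtered_lines : List String) : List String :=
  PySem.List.sorted
    (filtered_lines.filter (fun w => pvPatterns.any (fun p => PySem.Str.isIn p w)))
    pvKey false

-- ===== PRECONDITION & SPEC =====
def Spec_sort_by_status (filtered_lines : List String) (out : List String) : Prop := out = sort_by_status_alt filtered_lines
instance (filtered_lines : List String) (out : List String) : Decidable (Spec_sort_by_status filtered_lines out) := by unfold Spec_sort_by_status; infer_instance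

-- ===== CLAIM (what is proved, stated in full; the proofs are below) =====
def Claim_equal_sort_by_status : Prop := ∀ (filtered_lines : List String), Dom_sort_by_status filtered_lines → Spec_sort_by_status filtered_lines (sort_by_status filtered_lines)

-- ===== LEMMAS AND PROOFS =====

lemma pvEnum : PySem.List.enumerate pvPatterns 0 =
    [((0 : Int), "FIGHTS FOR LIFE"), (1, "INJURED"), (2, "IN PANIC"), (3, "BORED")] := rfl

lemma pvFind4 (w p0 p1 p2 p3 : String) (i0 i1 i2 i3 : Int) :
    (((List.find? (fun ip : Int × String => PySem.Str.isIn ip.2 w)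
        [(i0, p0), (i1, p1), (i2, p2), (i3, p3)]).map Prod.fst).getD 0) =
    (if PySem.Str.isIn p0 w then i0 else if PySem.Str.isIn p1 w then i1
     else if PySem.Str.isIn p2 w then i2 else if PySem.Str.isIn p3 w then i3 else 0) := by
  cases h0 : PySem.Chars.isIn p0.toList w.toList <;>
    cases h1 : PySem.Chars.isIn p1.toList w.toList <;>
      cases h2 : PySem.Chars.isIn p2.toList w.toList <;>
        cases h3 : PySem.Chars.isIn p3.toList w.toList <;>
          simp [List.find?, h0, h1, h2, h3]

lemma pvKey_unfold (w : String) :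
    pvKey w = (if PySem.Str.isIn "FIGHTS FOR LIFE" w then 0
      else if PySem.Str.isIn "INJURED" w then 1
      else if PySem.Str.isIn "IN PANIC" w then 2
      else if PySem.Str.isIn "BORED" w then 3 else 0) := by
  unfold pvKey
  rw [pvEnum]
  exact pvFind4 w "FIGHTS FOR LIFE" "INJURED" "IN PANIC" "BORED" 0 1 2 3

lemma pvKey_cases (w : String) : pvKey w = 0 ∨ pvKey w = 1 ∨ pvKey w = 2 ∨ pvKey w = 3 := by
  rw [pvKey_unfold]; split_ifs <;> simp

-- A's fold invariant, over four abstract patterns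
lemma pvGenFold (q0 q1 q2 q3 : String) (xs : List String) (f i p b : List String) :
    xs.foldl
      (fun (st : List String × List String × List String × List String) word =>
        if PySem.Str.isIn q0 word then
          (st.1 ++ [word], st.2.1, st.2.2.1, st.2.2.2)
        else if PySem.Str.isIn q1 word then
          (st.1, st.2.1 ++ [word], st.2.2.1, st.2.2.2)
        else if PySem.Str.isIn q2 word then
          (st.1, st.2.1, st.2.2.1 ++ [word], st.2.2.2)
        else if PySem.Str.isIn q3 word then
          (st.1, st.2.1, st.2.2.1, st.2.2.2 ++ [word])
        else st)
      ((f, i, p, b)) =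
    (f ++ xs.filter (fun w => PySem.Str.isIn q0 w),
     i ++ xs.filter (fun w => !PySem.Str.isIn q0 w && PySem.Str.isIn q1 w),
     p ++ xs.filter (fun w => !PySem.Str.isIn q0 w && !PySem.Str.isIn q1 w && PySem.Str.isIn q2 w),
     b ++ xs.filter (fun w => !PySem.Str.isIn q0 w && !PySem.Str.isIn q1 w && !PySem.Str.isIn q2 w && PySem.Str.isIn q3 w)) := by
  induction xs generalizing f i p b with
  | nil => simp
  | cons x xs ih =>
    simp only [List.foldl_cons, List.filter_cons]
    cases h0 : PySem.Str.isIn q0 x <;>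
      cases h1 : PySem.Str.isIn q1 x <;>
        cases h2 : PySem.Str.isIn q2 x <;>
          cases h3 : PySem.Str.isIn q3 x <;>
            simp only [h0, h1, h2, h3, Bool.not_true, Bool.not_false, Bool.true_and,
              Bool.false_and, Bool.and_true, Bool.and_false, Bool.and_self,
              eq_self_iff_true, Bool.false_eq_true, if_true, if_false] <;>
            rw [ih] <;> simp

lemma pvA_fold (xs : List String) (f i p b : List String) :
    xs.foldl
      (fun (st : List String × List String × List String × List String) word =>
        if PySem.Str.isIn (PySem.List.pyGetD ["FIGHTS FOR LIFE", "INJURED", "IN PANIC", "BORED"] 0 "") word then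
          (st.1 ++ [word], st.2.1, st.2.2.1, st.2.2.2)
        else if PySem.Str.isIn (PySem.List.pyGetD ["FIGHTS FOR LIFE", "INJURED", "IN PANIC", "BORED"] 1 "") word then
          (st.1, st.2.1 ++ [word], st.2.2.1, st.2.2.2)
        else if PySem.Str.isIn (PySem.List.pyGetD ["FIGHTS FOR LIFE", "INJURED", "IN PANIC", "BORED"] 2 "") word then
          (st.1, st.2.1, st.2.2.1 ++ [word], st.2.2.2)
        else if PySem.Str.isIn (PySem.List.pyGetD ["FIGHTS FOR LIFE", "INJURED", "IN PANIC", "BORED"] 3 "") word then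
          (st.1, st.2.1, st.2.2.1, st.2.2.2 ++ [word])
        else st)
      ((f, i, p, b)) =
    (f ++ xs.filter (fun w => PySem.Str.isIn "FIGHTS FOR LIFE" w),
     i ++ xs.filter (fun w => !PySem.Str.isIn "FIGHTS FOR LIFE" w && PySem.Str.isIn "INJURED" w),
     p ++ xs.filter (fun w => !PySem.Str.isIn "FIGHTS FOR LIFE" w && !PySem.Str.isIn "INJURED" w && PySem.Str.isIn "IN PANIC" w),
     b ++ xs.filter (fun w => !PySem.Str.isIn "FIGHTS FOR LIFE" w && !PySem.Str.isIn "INJURED" w && !PySem.Str.isIn "IN PANIC" w && PySem.Str.isIn "BORED" w)) := by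
  simp only [show PySem.List.pyGetD ["FIGHTS FOR LIFE", "INJURED", "IN PANIC", "BORED"] 0 "" = "FIGHTS FOR LIFE" from rfl,
    show PySem.List.pyGetD ["FIGHTS FOR LIFE", "INJURED", "IN PANIC", "BORED"] 1 "" = "INJURED" from rfl,
    show PySem.List.pyGetD ["FIGHTS FOR LIFE", "INJURED", "IN PANIC", "BORED"] 2 "" = "IN PANIC" from rfl,
    show PySem.List.pyGetD ["FIGHTS FOR LIFE", "INJURED", "IN PANIC", "BORED"] 3 "" = "BORED" from rfl]
  exact pvGenFold "FIGHTS FOR LIFE" "INJURED" "IN PANIC" "BORED" xs f i p b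

lemma pvInsertBy_append {α : Type} (before : α → α → Bool) (x : α) (ys zs : List α)
    (h : ∀ y ∈ ys, before x y = false) :
    PySem.List.insertBy before x (ys ++ zs) = ys ++ PySem.List.insertBy before x zs := by
  induction ys with
  | nil => simp
  | cons y ys ih =>
    have hy : before x y = false := h y (by simp)
    cases hzs : ys ++ zs with
    | nil =>
      obtain ⟨rfl, rfl⟩ := List.append_eq_nil_iff.mp hzs
      simp [PySem.List.insertBy, hy]
    | cons a t =>
      simp only [List.cons_append, hzs]
      rw [show PySem.List.insertBy before x (y :: a :: t)
            = y :: PySem.List.insertBy before x (a :: t) by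
          simp [PySem.List.insertBy, hy]]
      rw [← hzs, ih (fun y hy => h y (by simp [hy]))]

lemma pvInsertBy_all_before {α : Type} (before : α → α → Bool) (x : α) (zs : List α)
    (h : ∀ z ∈ zs, before x z = true) :
    PySem.List.insertBy before x zs = x :: zs := by
  cases zs with
  | nil => rfl
  | cons z t => simp [PySem.List.insertBy, h z (by simp)]

-- stable sort by pvKey is the concatenation of the four key classes
lemma pvSorted_blocks (ys : List String) :
    PySem.List.sorted ys pvKey false =
      ys.filter (fun w => pvKey w == 0) ++ ys.filter (fun w => pvKey w == 1) ++
      ys.filter (fun w => pvKey w == 2) ++ ys.filter (fun w => pvKey w == 3) := by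
  rw [PySem.List.sorted_eq_foldl_insertBy]
  induction ys using List.reverseRecOn with
  | nil => simp
  | append_singleton ys x ih =>
    rw [List.foldl_append, List.foldl_cons, List.foldl_nil, ih]
    have key_mem : ∀ (j : Int) (w : String), w ∈ ys.filter (fun w => pvKey w == j) → pvKey w = j := by
      intro j w hw
      have := List.of_mem_filter hw
      simpa using this
    rcases pvKey_cases x with hx | hx | hx | hx
    · rw [show ys.filter (fun w => pvKey w == 0) ++ ys.filter (fun w => pvKey w == 1) ++
            ys.filter (fun w => pvKey w == 2) ++ ys.filter (fun w => pvKey w == 3) =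
            ys.filter (fun w => pvKey w == 0) ++ (ys.filter (fun w => pvKey w == 1) ++
            ys.filter (fun w => pvKey w == 2) ++ ys.filter (fun w => pvKey w == 3)) by simp,
        pvInsertBy_append _ x _ _ (by
          intro y hy
          have := key_mem _ _ hy
          simp only [hx, this]
          decide),
        pvInsertBy_all_before _ x _ (by
          intro z hz
          simp only [List.mem_append] at hz
          rcases hz with (h | h) | h <;>
            · have := key_mem _ _ h
              simp only [hx, this]
              decide)]
      simp [List.filter_append, List.filter_cons, hx]
    · rw [show ys.filter (fun w => pvKey w == 0) ++ ys.filter (fun w => pvKey w == 1) ++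
            ys.filter (fun w => pvKey w == 2) ++ ys.filter (fun w => pvKey w == 3) =
            (ys.filter (fun w => pvKey w == 0) ++ ys.filter (fun w => pvKey w == 1)) ++
            (ys.filter (fun w => pvKey w == 2) ++ ys.filter (fun w => pvKey w == 3)) by simp,
        pvInsertBy_append _ x _ _ (by
          intro y hy
          simp only [List.mem_append] at hy
          rcases hy with h | h <;>
            · have := key_mem _ _ h
              simp only [hx, this]
              decide),
        pvInsertBy_all_before _ x _ (by
          intro z hz
          simp only [List.mem_append] at hz
          rcases hz with h | h <;>
            · have := key_mem _ _ h
              simp only [hx, this]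
              decide)]
      simp [List.filter_append, List.filter_cons, hx]
    · rw [show ys.filter (fun w => pvKey w == 0) ++ ys.filter (fun w => pvKey w == 1) ++
            ys.filter (fun w => pvKey w == 2) ++ ys.filter (fun w => pvKey w == 3) =
            (ys.filter (fun w => pvKey w == 0) ++ ys.filter (fun w => pvKey w == 1) ++
            ys.filter (fun w => pvKey w == 2)) ++ ys.filter (fun w => pvKey w == 3) by simp,
        pvInsertBy_append _ x _ _ (by
          intro y hy
          simp only [List.mem_append] at hy
          rcases hy with (h | h) | h <;>
            · have := key_mem _ _ h
              simp only [hx, this]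
              decide),
        pvInsertBy_all_before _ x _ (by
          intro z hz
          have := key_mem _ _ hz
          simp only [hx, this]
          decide)]
      simp [List.filter_append, List.filter_cons, hx]
    · rw [show ys.filter (fun w => pvKey w == 0) ++ ys.filter (fun w => pvKey w == 1) ++
            ys.filter (fun w => pvKey w == 2) ++ ys.filter (fun w => pvKey w == 3) =
            (ys.filter (fun w => pvKey w == 0) ++ ys.filter (fun w => pvKey w == 1) ++
            ys.filter (fun w => pvKey w == 2) ++ ys.filter (fun w => pvKey w == 3)) ++ [] by simp,
        pvInsertBy_append _ x _ [] (by
          intro y hy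
          simp only [List.mem_append] at hy
          rcases hy with ((h | h) | h) | h <;>
            · have := key_mem _ _ h
              simp only [hx, this]
              decide)]
      simp [List.filter_append, List.filter_cons, hx, PySem.List.insertBy]

-- branch conditions ↔ key classes, as a pure Boolean fact
lemma pvBool4 (a b c d : Bool) :
    ((a || (b || (c || (d || false)))) && ((if a = true then (0 : Int) else if b = true then 1 else if c = true then 2 else if d = true then 3 else 0) == 0)) = a ∧
    ((a || (b || (c || (d || false)))) && ((if a = true then (0 : Int) else if b = true then 1 else if c = true then 2 else if d = true then 3 else 0) == 1)) = (!a && b) ∧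
    ((a || (b || (c || (d || false)))) && ((if a = true then (0 : Int) else if b = true then 1 else if c = true then 2 else if d = true then 3 else 0) == 2)) = (!a && !b && c) ∧
    ((a || (b || (c || (d || false)))) && ((if a = true then (0 : Int) else if b = true then 1 else if c = true then 2 else if d = true then 3 else 0) == 3)) = (!a && !b && !c && d) ∧
    (((if a = true then (0 : Int) else if b = true then 1 else if c = true then 2 else if d = true then 3 else 0) == 0) && (a || (b || (c || (d || false))))) = a ∧
    (((if a = true then (0 : Int) else if b = true then 1 else if c = true then 2 else if d = true then 3 else 0) == 1) && (a || (b || (c || (d || false))))) = (!a && b) ∧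
    (((if a = true then (0 : Int) else if b = true then 1 else if c = true then 2 else if d = true then 3 else 0) == 2) && (a || (b || (c || (d || false))))) = (!a && !b && c) ∧
    (((if a = true then (0 : Int) else if b = true then 1 else if c = true then 2 else if d = true then 3 else 0) == 3) && (a || (b || (c || (d || false))))) = (!a && !b && !c && d) := by
  cases a <;> cases b <;> cases c <;> cases d <;> decide

lemma pvFilter_match_key (xs : List String) :
    ((xs.filter (fun w => pvPatterns.any (fun p => PySem.Str.isIn p w))).filter (fun w => pvKey w == 0)
        = xs.filter (fun w => PySem.Str.isIn "FIGHTS FOR LIFE" w)) ∧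
    ((xs.filter (fun w => pvPatterns.any (fun p => PySem.Str.isIn p w))).filter (fun w => pvKey w == 1)
        = xs.filter (fun w => !PySem.Str.isIn "FIGHTS FOR LIFE" w && PySem.Str.isIn "INJURED" w)) ∧
    ((xs.filter (fun w => pvPatterns.any (fun p => PySem.Str.isIn p w))).filter (fun w => pvKey w == 2)
        = xs.filter (fun w => !PySem.Str.isIn "FIGHTS FOR LIFE" w && !PySem.Str.isIn "INJURED" w && PySem.Str.isIn "IN PANIC" w)) ∧
    ((xs.filter (fun w => pvPatterns.any (fun p => PySem.Str.isIn p w))).filter (fun w => pvKey w == 3)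
        = xs.filter (fun w => !PySem.Str.isIn "FIGHTS FOR LIFE" w && !PySem.Str.isIn "INJURED" w && !PySem.Str.isIn "IN PANIC" w && PySem.Str.isIn "BORED" w)) := by
  refine ⟨?_, ?_, ?_, ?_⟩ <;>
    · rw [List.filter_filter]
      refine List.filter_congr ?_
      intro w _
      rw [pvKey_unfold w]
      simp only [pvPatterns, List.any_cons, List.any_nil]
      obtain ⟨e1, e2, e3, e4, e5, e6, e7, e8⟩ :=
        pvBool4 (PySem.Str.isIn "FIGHTS FOR LIFE" w) (PySem.Str.isIn "INJURED" w)
          (PySem.Str.isIn "IN PANIC" w) (PySem.Str.isIn "BORED" w)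
      first
        | exact e1 | exact e2 | exact e3 | exact e4
        | exact e5 | exact e6 | exact e7 | exact e8

-- ===== VERDICT (by name: the statement is the Claim_ definition above) =====
theorem sort_by_status_spec : Claim_equal_sort_by_status := by
  intro xs _
  show sort_by_status xs = sort_by_status_alt xs
  simp only [sort_by_status, sort_by_status_alt]
  rw [pvA_fold xs [] [] [] []]
  rw [pvSorted_blocks]
  obtain ⟨e0, e1, e2, e3⟩ := pvFilter_match_key xs
  rw [e0, e1, e2, e3]
  simp
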